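-- pv_equiv track=rewrite | github.com/Marcin-Ramotowski/checkio-exercises | Electronic Station/words_order.py | words_order
-- ===== SOURCE A (Python) =====
-- def words_order(text: str, words: list) -> bool:
--     a = text.split()
--     numbers = []
--     for word in words:
--         x = words.count(word)
--         if x > 1:
--             return False
--         if word in a:
--             n = text.find(word)
--             numbers.append(n)
--         else:
--             return False
--     numbers2 = numbers.copy()
--     numbers2.sort()
--     if numbers == numbers2:
--         return True
--     return False
-- ===== SOURCE B (Python) =====
-- def words_order(text: str, words: list) -> bool:
--     tokens = text.split()
--     seen = set()
--     prev = -1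
--     for word in words:
--         if word in seen or word not in tokens:
--             return False
--         pos = text.find(word)
--         if pos < prev:
--             return False
--         seen.add(word)
--         prev = pos
--     return True
-- ===== Notes on version B (the rewrite author's own statement) =====
-- stated objective: alternative
-- what changed: A's per-word whole-list count scan plus build-the-position-list-then-sort-and-compare is replaced by a single pass that maintains a seen-set (duplicates fail at their second occurrence) and the previous find position (monotonicity checked on the fly), so no position list and no sort are ever built.
import Mathlib
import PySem

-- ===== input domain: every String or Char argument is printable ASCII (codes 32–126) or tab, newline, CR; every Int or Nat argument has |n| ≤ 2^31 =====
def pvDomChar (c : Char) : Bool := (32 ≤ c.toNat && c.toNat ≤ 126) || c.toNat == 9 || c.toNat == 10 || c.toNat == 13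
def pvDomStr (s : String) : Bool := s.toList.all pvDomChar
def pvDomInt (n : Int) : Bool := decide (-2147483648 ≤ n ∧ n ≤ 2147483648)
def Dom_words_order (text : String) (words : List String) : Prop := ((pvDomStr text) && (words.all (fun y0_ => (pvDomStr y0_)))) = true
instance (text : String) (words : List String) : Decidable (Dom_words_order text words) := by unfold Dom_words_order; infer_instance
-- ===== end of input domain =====

-- B replaces A's per-word count scan + build-positions-then-sort-and-compare by one pass with a
-- seen-set and a previous-position accumulator (alternative decomposition, no sort).


-- ===== PORT A =====
-- the for-loop of A: early return False = none, otherwise the accumulated numbers list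
def wordsOrderLoop (text : String) (a : List String) (words : List String) :
    List String → List Int → Option (List Int)
  | [], numbers => some numbers
  | word :: rest, numbers =>
    let x := PySem.List.count words word
    if x > 1 then none
    else if a.contains word then
      wordsOrderLoop text a words rest (numbers ++ [PySem.Str.find text word])
    else none

def words_order (text : String) (words : List String) : Bool :=
  let a := PySem.Str.split₀ text
  match wordsOrderLoop text a words words [] with
  | none => false
  | some numbers =>
    let numbers2 := PySem.List.sorted numbers (fun x => x) false
    if numbers == numbers2 then true else false

-- ===== PORT B =====
-- the for-loop of B: seen-set and previous-position accumulator, early return False = false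
def wordsOrderAltGo (text : String) (tokens : List String) :
    List String → PySem.Set String → Int → Bool
  | [], _, _ => true
  | word :: rest, seen, prev =>
    if PySem.Set.contains seen word || !(tokens.contains word) then false
    else
      let pos := PySem.Str.find text word
      if pos < prev then false
      else wordsOrderAltGo text tokens rest (PySem.Set.add seen word) pos

def words_order_alt (text : String) (words : List String) : Bool :=
  wordsOrderAltGo text (PySem.Str.split₀ text) words PySem.Set.empty (-1)

-- ===== PRECONDITION & SPEC =====
def Spec_words_order (text : String) (words : List String) (out : Bool) : Prop := out = words_order_alt text words
instance (text : String) (words : List String) (out : Bool) : Decidable (Spec_words_order text words out) := by unfold Spec_words_order; infer_instance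

-- ===== CLAIM =====
def Claim_equal_words_order : Prop := ∀ (text : String) (words : List String), Dom_words_order text words → Spec_words_order text words (words_order text words)

-- ===== LEMMAS AND PROOFS =====

-- the common truth condition of both programs
def wordsOrderProp (text : String) (words : List String) : Prop :=
  words.Nodup ∧ (∀ w ∈ words, (PySem.Str.split₀ text).contains w = true) ∧
    List.Pairwise (· ≤ ·) (words.map (PySem.Str.find text))

lemma loopA_some_iff (text : String) (a : List String) (words : List String) :
    ∀ (ws : List String) (nums : List Int) (r : List Int),
      wordsOrderLoop text a words ws nums = some r ↔
        ((∀ w ∈ ws, PySem.List.count words w ≤ 1 ∧ a.contains w = true) ∧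
          r = nums ++ ws.map (PySem.Str.find text)) := by
  intro ws
  induction ws with
  | nil => intro nums r; simp [wordsOrderLoop]; tauto
  | cons w rest ih =>
    intro nums r
    simp [wordsOrderLoop, ih]
    tauto

lemma A_true_iff (text : String) (words : List String) :
    words_order text words = true ↔ wordsOrderProp text words := by
  unfold words_order wordsOrderProp
  rcases h : wordsOrderLoop text (PySem.Str.split₀ text) words words [] with _ | numbers <;>
    simp only [h]
  · constructor
    · intro hfalse; simp at hfalse
    · rintro ⟨hnd, hmem, _⟩
      have : wordsOrderLoop text (PySem.Str.split₀ text) words words [] =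
          some ([] ++ words.map (PySem.Str.find text)) := by
        rw [loopA_some_iff]
        refine ⟨fun w hw => ⟨?_, hmem w hw⟩, rfl⟩
        simp only [PySem.List.count_eq]
        exact List.nodup_iff_count_le_one.mp hnd w
      rw [h] at this; exact absurd this (by simp)
  · have hc := (loopA_some_iff text (PySem.Str.split₀ text) words words [] numbers).mp h
    obtain ⟨hall, rfl⟩ := hc
    simp only [List.nil_append, beq_iff_eq]
    constructor
    · intro htrue
      have heq : words.map (PySem.Str.find text) =
          PySem.List.sorted (words.map (PySem.Str.find text)) (fun x => x) false := by
        by_contra hne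
        simp only [Bool.if_false_right, Bool.and_true, decide_eq_true_eq] at htrue
        exact hne htrue
      refine ⟨?_, fun w hw => (hall w hw).2, ?_⟩
      · rw [List.nodup_iff_count_le_one]
        intro w
        by_cases hw : w ∈ words
        · have := (hall w hw).1; simpa [PySem.List.count_eq] using this
        · simp [List.count_eq_zero_of_not_mem hw]
      · have := PySem.List.sorted_pairwise (words.map (PySem.Str.find text)) (fun x => x)
        rw [← heq] at this
        simpa using this
    · rintro ⟨-, -, hpw⟩
      have heq := PySem.List.sorted_eq_self_of_pairwise (xs := words.map (PySem.Str.find text))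
        (key := fun x => x) (by simpa using hpw)
      simp [heq]

lemma goB_true_iff (text : String) (tokens : List String) :
    ∀ (ws : List String) (seen : PySem.Set String) (prev : Int),
      wordsOrderAltGo text tokens ws seen prev = true ↔
        ((∀ w ∈ ws, ¬ w ∈ seen) ∧ ws.Nodup ∧ (∀ w ∈ ws, tokens.contains w = true) ∧
          List.Pairwise (· ≤ ·) (prev :: ws.map (PySem.Str.find text))) := by
  intro ws
  induction ws with
  | nil => intro seen prev; simp [wordsOrderAltGo]
  | cons w rest ih =>
    intro seen prev
    simp only [wordsOrderAltGo]
    simp [ih, List.pairwise_cons, PySem.Set.mem_add]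
    constructor
    · rintro ⟨⟨hns, htk⟩, hle, hrs, hnd, hmem, hge, hpw⟩
      exact ⟨⟨hns, fun a ha => (hrs a ha).1⟩, ⟨fun hc => (hrs w hc).2 rfl, hnd⟩, ⟨htk, hmem⟩,
        ⟨hle, fun a ha => le_trans hle (hge a ha)⟩, hge, hpw⟩
    · rintro ⟨⟨hns, hseen⟩, ⟨hwr, hnd⟩, ⟨htk, hmem⟩, ⟨hle, -⟩, hge, hpw⟩
      exact ⟨⟨hns, htk⟩, hle, fun a ha => ⟨hseen a ha, fun hc => hwr (hc ▸ ha)⟩, hnd, hmem, hge, hpw⟩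

lemma B_true_iff (text : String) (words : List String) :
    words_order_alt text words = true ↔ wordsOrderProp text words := by
  unfold words_order_alt wordsOrderProp
  rw [goB_true_iff]
  constructor
  · rintro ⟨-, hnd, hmem, hpw⟩
    exact ⟨hnd, hmem, (List.pairwise_cons.mp hpw).2⟩
  · rintro ⟨hnd, hmem, hpw⟩
    refine ⟨by simp [PySem.Set.empty], hnd, hmem, List.pairwise_cons.mpr ⟨?_, hpw⟩⟩
    intro x hx
    simp only [List.mem_map] at hx
    obtain ⟨w, -, rfl⟩ := hx
    simpa [PySem.Str.find_eq] using PySem.Chars.neg_one_le_find text.toList w.toList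

-- ===== VERDICT =====
theorem words_order_spec : Claim_equal_words_order := by
  intro text words _
  unfold Spec_words_order
  rw [Bool.eq_iff_iff, A_true_iff, B_true_iff]
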